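-- pv_equiv track=rewrite | github.com/Spandan2003/jpeg-image-compression | JPEG_engine.py | decode_dc_coefficients
-- ===== SOURCE A (Python) =====
-- def decode_huffman_data(encoded_data, decoding_map):
--     current_code = ""
--     decoded_symbols = []
--     for bit in encoded_data:
--         current_code += bit
--         if current_code in decoding_map:
--             decoded_symbols.append(decoding_map[current_code])
--             current_code = ""
--     return decoded_symbols
--
-- def decode_dc_coefficients(encoded_dc, dc_decoding_map):
--     dc_differences = decode_huffman_data(encoded_dc, dc_decoding_map)
--     dc_coefficients = []
--     previous_dc = 0
--     for diff in dc_differences: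
--         current_dc = previous_dc + diff
--         dc_coefficients.append(current_dc)
--         previous_dc = current_dc
--     return dc_coefficients
-- ===== SOURCE B (Python) =====
-- def decode_dc_coefficients(encoded_dc, dc_decoding_map):
--     # single fused pass: decode each Huffman code and accumulate the running DC value
--     dc_coefficients = []
--     previous_dc = 0
--     current_code = ""
--     for bit in encoded_dc:
--         current_code += bit
--         if current_code in dc_decoding_map:
--             previous_dc += dc_decoding_map[current_code]
--             dc_coefficients.append(previous_dc)
--             current_code = ""
--     return dc_coefficients
-- ===== Notes on version B (the rewrite author's own statement) =====
-- stated objective: simpler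
-- what changed: Fuses the two sequential loops (Huffman decode into a differences list, then cumulative-sum loop) into one pass that accumulates the running DC value directly, eliminating the helper and the intermediate list.
import Mathlib
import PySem

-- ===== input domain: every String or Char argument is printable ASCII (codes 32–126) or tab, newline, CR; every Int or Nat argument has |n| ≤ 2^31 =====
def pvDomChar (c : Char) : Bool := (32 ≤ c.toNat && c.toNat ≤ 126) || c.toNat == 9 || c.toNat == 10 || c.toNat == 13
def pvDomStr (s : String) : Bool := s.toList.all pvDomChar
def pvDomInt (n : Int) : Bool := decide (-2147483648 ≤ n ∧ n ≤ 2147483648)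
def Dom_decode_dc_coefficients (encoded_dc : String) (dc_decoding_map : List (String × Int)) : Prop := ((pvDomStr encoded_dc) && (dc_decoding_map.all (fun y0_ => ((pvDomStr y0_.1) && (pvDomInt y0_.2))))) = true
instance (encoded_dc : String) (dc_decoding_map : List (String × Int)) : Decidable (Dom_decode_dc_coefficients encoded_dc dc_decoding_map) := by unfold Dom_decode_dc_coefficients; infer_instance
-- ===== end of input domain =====

-- B fuses A's two sequential loops (Huffman decode, then cumulative sum) into one pass
-- keeping a running DC value; no intermediate list of differences is built (objective: simpler).

-- ===== PORT A =====
-- dict lookup (first match in the association list, as Python dict with unique keys)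
def pvLookup (m : List (String × Int)) (k : String) : Option Int :=
  (m.find? (fun p => p.1 == k)).map (·.2)

-- one step of decode_huffman_data's loop body: extend the code, emit on a match
def huffStep (m : List (String × Int)) (st : List Char × List Int) (bit : Char) :
    List Char × List Int :=
  match pvLookup m (String.mk (st.1 ++ [bit])) with
  | some v => ([], st.2 ++ [v])
  | none => (st.1 ++ [bit], st.2)

def decode_huffman_data (encoded_data : String) (decoding_map : List (String × Int)) : List Int :=
  (encoded_data.toList.foldl (huffStep decoding_map) ([], [])).2

-- one step of the cumulative-sum loop of A
def sumStep (st : List Int × Int) (diff : Int) : List Int × Int :=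
  (st.1 ++ [st.2 + diff], st.2 + diff)

def decode_dc_coefficients (encoded_dc : String) (dc_decoding_map : List (String × Int)) : List Int :=
  let dc_differences := decode_huffman_data encoded_dc dc_decoding_map
  (dc_differences.foldl sumStep ([], 0)).1

-- ===== PORT B =====
-- fused loop body: state = (current_code, previous_dc, result)
def fusedStep (m : List (String × Int)) (st : List Char × Int × List Int) (bit : Char) :
    List Char × Int × List Int :=
  match pvLookup m (String.mk (st.1 ++ [bit])) with
  | some v => ([], st.2.1 + v, st.2.2 ++ [st.2.1 + v])
  | none => (st.1 ++ [bit], st.2)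

def decode_dc_coefficients_alt (encoded_dc : String) (dc_decoding_map : List (String × Int)) : List Int :=
  (encoded_dc.toList.foldl (fusedStep dc_decoding_map) ([], 0, [])).2.2

-- ===== PRECONDITION & SPEC =====
def Spec_decode_dc_coefficients (encoded_dc : String) (dc_decoding_map : List (String × Int)) (out : List Int) : Prop := out = decode_dc_coefficients_alt encoded_dc dc_decoding_map
instance (encoded_dc : String) (dc_decoding_map : List (String × Int)) (out : List Int) : Decidable (Spec_decode_dc_coefficients encoded_dc dc_decoding_map out) := by unfold Spec_decode_dc_coefficients; infer_instance

-- ===== CLAIM (what is proved, stated in full; the proofs are below) =====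
def Claim_equal_decode_dc_coefficients : Prop := ∀ (encoded_dc : String) (dc_decoding_map : List (String × Int)), Dom_decode_dc_coefficients encoded_dc dc_decoding_map → Spec_decode_dc_coefficients encoded_dc dc_decoding_map (decode_dc_coefficients encoded_dc dc_decoding_map)

-- ===== LEMMAS AND PROOFS =====

-- the diffs accumulator of A's first loop only collects at the end
theorem huff_acc (m : List (String × Int)) :
    ∀ (bits : List Char) (code : List Char) (acc : List Int),
      (bits.foldl (huffStep m) (code, acc)).2
        = acc ++ (bits.foldl (huffStep m) (code, [])).2 := by
  intro bits
  induction bits with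
  | nil => intro code acc; simp
  | cons b bs ih =>
    intro code acc
    cases h : pvLookup m (String.mk (code ++ [b])) with
    | none => simp only [List.foldl_cons, huffStep, h]; exact ih _ acc
    | some v =>
      simp only [List.foldl_cons, huffStep, h, List.nil_append]
      rw [ih [] (acc ++ [v]), ih [] [v], List.append_assoc]

-- the coefficients accumulator of A's second loop only collects at the end
theorem sum_acc :
    ∀ (ds : List Int) (acc : List Int) (prev : Int),
      (ds.foldl sumStep (acc, prev)).1
        = acc ++ (ds.foldl sumStep ([], prev)).1 := by
  intro ds
  induction ds with
  | nil => intro acc prev; simp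
  | cons d rest ih =>
    intro acc prev
    simp only [List.foldl_cons, sumStep, List.nil_append]
    rw [ih (acc ++ [prev + d]) (prev + d), ih [prev + d] (prev + d), List.append_assoc]

-- B's result accumulator only collects at the end
theorem fused_acc (m : List (String × Int)) :
    ∀ (bits : List Char) (code : List Char) (prev : Int) (acc : List Int),
      (bits.foldl (fusedStep m) (code, prev, acc)).2.2
        = acc ++ (bits.foldl (fusedStep m) (code, prev, [])).2.2 := by
  intro bits
  induction bits with
  | nil => intro code prev acc; simp
  | cons b bs ih =>
    intro code prev acc
    cases h : pvLookup m (String.mk (code ++ [b])) with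
    | none => simp only [List.foldl_cons, fusedStep, h]; exact ih _ _ acc
    | some v =>
      simp only [List.foldl_cons, fusedStep, h, List.nil_append]
      rw [ih [] (prev + v) (acc ++ [prev + v]), ih [] (prev + v) [prev + v],
        List.append_assoc]

-- the fused pass equals decode-then-cumulate, for any starting code and previous value
theorem fused_eq (m : List (String × Int)) :
    ∀ (bits : List Char) (code : List Char) (prev : Int),
      (bits.foldl (fusedStep m) (code, prev, [])).2.2
        = (((bits.foldl (huffStep m) (code, [])).2).foldl sumStep ([], prev)).1 := by
  intro bits
  induction bits with
  | nil => intro code prev; simp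
  | cons b bs ih =>
    intro code prev
    cases h : pvLookup m (String.mk (code ++ [b])) with
    | none =>
      simp only [List.foldl_cons, fusedStep, huffStep, h]
      exact ih (code ++ [b]) prev
    | some v =>
      simp only [List.foldl_cons, fusedStep, huffStep, h, List.nil_append]
      rw [fused_acc m bs [] (prev + v) [prev + v], huff_acc m bs [] [v]]
      simp only [List.singleton_append, List.foldl_cons, sumStep, List.nil_append]
      rw [sum_acc ((bs.foldl (huffStep m) ([], [])).2) [prev + v] (prev + v),
        ih [] (prev + v)]
      rfl

-- ===== VERDICT (by name: the statement is the Claim_ definition above) =====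
theorem decode_dc_coefficients_spec : Claim_equal_decode_dc_coefficients := by
  intro encoded_dc dc_decoding_map _
  unfold Spec_decode_dc_coefficients decode_dc_coefficients decode_dc_coefficients_alt decode_huffman_data
  rw [fused_eq]
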